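-- pv_equiv track=rewrite | github.com/LumaFonseca/Impact_assessment_2 | Stormwater_assessment_4.py | keywords_nearby
-- ===== SOURCE A (Python) =====
-- import string
--
-- def keywords_nearby(text: str, phrase1: str, phrase2: str, max_distance: int = 10) -> bool:
--     stop_words = {"the", "a", "an", "is", "are", "was", "were", "and", "or", "but", "of", "for", "to"}
--     text_clean = text.lower().translate(str.maketrans('', '', string.punctuation))
--     words = [w for w in text_clean.split() if w not in stop_words]
--
--     tokens1 = phrase1.lower().split()
--     tokens2 = phrase2.lower().split()
--
--     positions1 = [i for i, word in enumerate(words) if word in tokens1]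
--     positions2 = [i for i, word in enumerate(words) if word in tokens2]
--
--     for i in positions1:
--         for j in positions2:
--             if abs(i - j) <= max_distance:
--                 return True
--     return False
-- ===== SOURCE B (Python) =====
-- import string
--
-- def keywords_nearby(text: str, phrase1: str, phrase2: str, max_distance: int = 10) -> bool:
--     stop_words = {"the", "a", "an", "is", "are", "was", "were", "and", "or", "but", "of", "for", "to"}
--     text_clean = text.lower().translate(str.maketrans('', '', string.punctuation))
--     words = [w for w in text_clean.split() if w not in stop_words]
--
--     tokens1 = set(phrase1.lower().split())
--     tokens2 = set(phrase2.lower().split())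
--
--     # single pass: track the latest position at which each phrase matched
--     last1 = last2 = None
--     for i, w in enumerate(words):
--         if w in tokens1:
--             last1 = i
--         if w in tokens2:
--             last2 = i
--         if last1 is not None and last2 is not None and abs(last1 - last2) <= max_distance:
--             return True
--     return False
-- ===== Notes on version B (the rewrite author's own statement) =====
-- stated objective: alternative
-- what changed: Replaces A's construction of two position lists followed by a nested all-pairs scan with a single pass over the words that tracks the latest matching position of each phrase and tests their distance each step (linear in the word count instead of quadratic in the match counts, but not measurably faster at the sizes timed).
import Mathlib
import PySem

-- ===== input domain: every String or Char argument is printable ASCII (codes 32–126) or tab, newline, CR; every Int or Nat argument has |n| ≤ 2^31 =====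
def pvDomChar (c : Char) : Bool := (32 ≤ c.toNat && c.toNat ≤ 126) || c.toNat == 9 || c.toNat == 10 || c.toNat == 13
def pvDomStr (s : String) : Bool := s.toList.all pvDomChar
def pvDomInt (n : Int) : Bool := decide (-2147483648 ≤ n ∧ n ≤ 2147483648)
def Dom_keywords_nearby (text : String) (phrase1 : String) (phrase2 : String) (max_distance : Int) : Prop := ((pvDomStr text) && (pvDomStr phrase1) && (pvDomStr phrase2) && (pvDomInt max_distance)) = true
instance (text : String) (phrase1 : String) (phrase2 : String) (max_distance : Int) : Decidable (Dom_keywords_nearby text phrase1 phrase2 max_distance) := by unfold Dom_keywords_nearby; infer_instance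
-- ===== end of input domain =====

-- B replaces A's nested scan over the two position lists by a single pass over the
-- words that tracks the latest matching position of each phrase (objective: alternative).

-- shared preprocessing (identical lines in both Pythons): stop words, punctuation strip, tokenising
def pvStopWords : List String := ["the", "a", "an", "is", "are", "was", "were", "and", "or", "but", "of", "for", "to"]
def pvPunct : List Char := "!\"#$%&'()*+,-./:;<=>?@[\\]^_`{|}~".toList
def pvWords (text : String) : List String :=
  let text_clean := String.ofList ((PySem.Str.lower text).toList.filter (fun c => ¬ pvPunct.contains c))
  (PySem.Str.split₀ text_clean).filter (fun w => ¬ pvStopWords.contains w)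
def pvTokens (phrase : String) : List String := PySem.Str.split₀ (PySem.Str.lower phrase)

-- ===== PORT A =====
-- the inner loop 'for j in positions2: if abs(i - j) <= max_distance: return True'
def kwInner (i : Int) (ps2 : List Int) (d : Int) : Bool :=
  match ps2 with
  | [] => false
  | j :: t => if |i - j| ≤ d then true else kwInner i t d

-- the outer loop 'for i in positions1: …'
def kwOuter (ps1 ps2 : List Int) (d : Int) : Bool :=
  match ps1 with
  | [] => false
  | i :: t => if kwInner i ps2 d then true else kwOuter t ps2 d

def keywords_nearby (text : String) (phrase1 : String) (phrase2 : String) (max_distance : Int) : Bool :=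
  let words := pvWords text
  let tokens1 := pvTokens phrase1
  let tokens2 := pvTokens phrase2
  let positions1 := ((PySem.List.enumerate words 0).filter (fun p => tokens1.contains p.2)).map Prod.fst
  let positions2 := ((PySem.List.enumerate words 0).filter (fun p => tokens2.contains p.2)).map Prod.fst
  kwOuter positions1 positions2 max_distance

-- ===== PORT B =====
-- 'last1 is not None and last2 is not None and abs(last1 - last2) <= max_distance'
def kwClose (d : Int) (l1 l2 : Option Int) : Bool :=
  match l1, l2 with
  | some a, some b => decide (|a - b| ≤ d)
  | _, _ => false

-- B's single loop 'for i, w in enumerate(words)' carrying last1/last2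
def kwScan (d : Int) (t1 t2 : PySem.Set String) (l : List (Int × String)) (last1 last2 : Option Int) : Bool :=
  match l with
  | [] => false
  | (i, w) :: rest =>
    let last1' := if t1.contains w then some i else last1
    let last2' := if t2.contains w then some i else last2
    if kwClose d last1' last2' then true
    else kwScan d t1 t2 rest last1' last2'

def keywords_nearby_alt (text : String) (phrase1 : String) (phrase2 : String) (max_distance : Int) : Bool :=
  let words := pvWords text
  let tokens1 := PySem.Set.ofList (pvTokens phrase1)
  let tokens2 := PySem.Set.ofList (pvTokens phrase2)
  kwScan max_distance tokens1 tokens2 (PySem.List.enumerate words 0) none none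

-- ===== PRECONDITION & SPEC =====
def Spec_keywords_nearby (text : String) (phrase1 : String) (phrase2 : String) (max_distance : Int) (out : Bool) : Prop := out = keywords_nearby_alt text phrase1 phrase2 max_distance
instance (text : String) (phrase1 : String) (phrase2 : String) (max_distance : Int) (out : Bool) : Decidable (Spec_keywords_nearby text phrase1 phrase2 max_distance out) := by unfold Spec_keywords_nearby; infer_instance

-- ===== CLAIM (what is proved, stated in full; the proofs are below) =====
def Claim_equal_keywords_nearby : Prop := ∀ (text : String) (phrase1 : String) (phrase2 : String) (max_distance : Int), Dom_keywords_nearby text phrase1 phrase2 max_distance → Spec_keywords_nearby text phrase1 phrase2 max_distance (keywords_nearby text phrase1 phrase2 max_distance)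

-- ===== LEMMAS AND PROOFS =====

lemma kwInner_iff (i : Int) (ps2 : List Int) (d : Int) :
    kwInner i ps2 d = true ↔ ∃ j ∈ ps2, |i - j| ≤ d := by
  induction ps2 with
  | nil => simp [kwInner]
  | cons j t ih =>
    by_cases h : |i - j| ≤ d <;> simp [kwInner, h, ih]

lemma kwOuter_iff (ps1 ps2 : List Int) (d : Int) :
    kwOuter ps1 ps2 d = true ↔ ∃ i ∈ ps1, ∃ j ∈ ps2, |i - j| ≤ d := by
  induction ps1 with
  | nil => simp [kwOuter]
  | cons i t ih =>
    by_cases h : kwInner i ps2 d = true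
    · simp only [kwOuter, if_pos h, true_iff]
      exact ⟨i, List.mem_cons_self .., (kwInner_iff i ps2 d).1 h⟩
    · have hf : kwInner i ps2 d = false := by simpa using h
      have hni : ¬ ∃ j ∈ ps2, |i - j| ≤ d := by rw [← kwInner_iff]; simp [hf]
      simp only [kwOuter, hf, Bool.false_eq_true, if_false, ih]
      constructor
      · rintro ⟨x, hx, hj⟩; exact ⟨x, List.mem_cons_of_mem _ hx, hj⟩
      · rintro ⟨x, hx, hj⟩
        rcases List.mem_cons.mp hx with rfl | hx'
        · exact absurd hj hni
        · exact ⟨x, hx', hj⟩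

lemma kwClose_iff (d : Int) (l1 l2 : Option Int) :
    kwClose d l1 l2 = true ↔ ∃ a b, l1 = some a ∧ l2 = some b ∧ |a - b| ≤ d := by
  cases l1 <;> cases l2 <;> simp [kwClose]

-- completeness helper: phrase 1 matched at a (its stored position a' may have been
-- overwritten by a later match), and some phrase-2 match ahead is within reach of a
lemma kwScan_of_state1 (d : Int) (t1 t2 : PySem.Set String) (l : List (Int × String))
    (l1 l2 : Option Int) (a : Int)
    (hl1 : ∃ a', l1 = some a' ∧ a ≤ a' ∧ ∀ x ∈ l, a' < x.1)
    (hs : l.Pairwise (fun p q => p.1 < q.1))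
    (hex : ∃ q ∈ l, t2.contains q.2 = true ∧ q.1 - a ≤ d) :
    kwScan d t1 t2 l l1 l2 = true := by
  induction l generalizing l1 l2 with
  | nil => simp at hex
  | cons hd rest ih =>
    obtain ⟨i, w⟩ := hd
    obtain ⟨a', ha', haa', hub⟩ := hl1
    subst ha'
    have hai : a' < i := hub (i, w) (List.mem_cons_self ..)
    have hlt : ∀ x ∈ rest, i < x.1 := fun x hx => (List.pairwise_cons.mp hs).1 x hx
    have hs' := (List.pairwise_cons.mp hs).2
    simp only [kwScan]
    by_cases hchk : kwClose d (if t1.contains w then some i else some a')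
        (if t2.contains w then some i else l2) = true
    · rw [if_pos hchk]
    · rw [if_neg hchk]
      rcases hex with ⟨q, hq, hc2q, hqd⟩
      rcases List.mem_cons.mp hq with rfl | hqr
      · -- q is the head: the check must have fired, contradiction
        exfalso
        apply hchk
        have h2 : t2.contains (i, w).2 = true := hc2q
        have hqd' : i - a ≤ d := hqd
        rw [if_pos h2]
        by_cases h1 : t1.contains (i, w).2 = true
        · rw [if_pos h1]; simp only [kwClose, decide_eq_true_eq]; rw [abs_le]; omega
        · rw [if_neg h1]; simp only [kwClose, decide_eq_true_eq]; rw [abs_le]; omega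
      · apply ih _ _ _ hs' ⟨q, hqr, hc2q, hqd⟩
        by_cases h1 : t1.contains w = true
        · exact ⟨i, by rw [if_pos h1], by omega, hlt⟩
        · exact ⟨a', by rw [if_neg h1], haa', fun x hx => hub x (List.mem_cons_of_mem _ hx)⟩

-- symmetric helper for a stored phrase-2 position
lemma kwScan_of_state2 (d : Int) (t1 t2 : PySem.Set String) (l : List (Int × String))
    (l1 l2 : Option Int) (b : Int)
    (hl2 : ∃ b', l2 = some b' ∧ b ≤ b' ∧ ∀ x ∈ l, b' < x.1)
    (hs : l.Pairwise (fun p q => p.1 < q.1))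
    (hex : ∃ p ∈ l, t1.contains p.2 = true ∧ p.1 - b ≤ d) :
    kwScan d t1 t2 l l1 l2 = true := by
  induction l generalizing l1 l2 with
  | nil => simp at hex
  | cons hd rest ih =>
    obtain ⟨i, w⟩ := hd
    obtain ⟨b', hb', hbb', hub⟩ := hl2
    subst hb'
    have hbi : b' < i := hub (i, w) (List.mem_cons_self ..)
    have hlt : ∀ x ∈ rest, i < x.1 := fun x hx => (List.pairwise_cons.mp hs).1 x hx
    have hs' := (List.pairwise_cons.mp hs).2
    simp only [kwScan]
    by_cases hchk : kwClose d (if t1.contains w then some i else l1)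
        (if t2.contains w then some i else some b') = true
    · rw [if_pos hchk]
    · rw [if_neg hchk]
      rcases hex with ⟨p, hp, hc1p, hpd⟩
      rcases List.mem_cons.mp hp with rfl | hpr
      · exfalso
        apply hchk
        have h1 : t1.contains (i, w).2 = true := hc1p
        have hpd' : i - b ≤ d := hpd
        rw [if_pos h1]
        by_cases h2 : t2.contains (i, w).2 = true
        · rw [if_pos h2]; simp only [kwClose, decide_eq_true_eq]; rw [abs_le]; omega
        · rw [if_neg h2]; simp only [kwClose, decide_eq_true_eq]; rw [abs_le]; omega
      · apply ih _ _ _ hs' ⟨p, hpr, hc1p, hpd⟩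
        by_cases h2 : t2.contains w = true
        · exact ⟨i, by rw [if_pos h2], by omega, hlt⟩
        · exact ⟨b', by rw [if_neg h2], hbb', fun x hx => hub x (List.mem_cons_of_mem _ hx)⟩

-- completeness: any close pair of matching positions is found by the scan
lemma kwScan_of_pair (d : Int) (t1 t2 : PySem.Set String) (l : List (Int × String))
    (l1 l2 : Option Int)
    (hs : l.Pairwise (fun p q => p.1 < q.1))
    (hex : ∃ p ∈ l, ∃ q ∈ l, t1.contains p.2 = true ∧ t2.contains q.2 = true ∧ |p.1 - q.1| ≤ d) :
    kwScan d t1 t2 l l1 l2 = true := by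
  induction l generalizing l1 l2 with
  | nil => simp at hex
  | cons hd rest ih =>
    obtain ⟨i, w⟩ := hd
    have hlt : ∀ x ∈ rest, i < x.1 := fun x hx => (List.pairwise_cons.mp hs).1 x hx
    have hs' := (List.pairwise_cons.mp hs).2
    simp only [kwScan]
    by_cases hchk : kwClose d (if t1.contains w then some i else l1)
        (if t2.contains w then some i else l2) = true
    · rw [if_pos hchk]
    · rw [if_neg hchk]
      rcases hex with ⟨p, hp, q, hq, hc1p, hc2q, hpq⟩
      rcases List.mem_cons.mp hp with rfl | hpr <;> rcases List.mem_cons.mp hq with h' | hqr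
      · -- both are the head: check fires
        exfalso
        apply hchk
        have h1 : t1.contains (i, w).2 = true := hc1p
        have h2 : t2.contains (i, w).2 = true := by rw [h'] at hc2q; exact hc2q
        have h0 : |i - i| ≤ d := by
          have := hpq; rw [h'] at this; exact this
        rw [if_pos h1, if_pos h2]
        simp only [kwClose, decide_eq_true_eq]
        exact h0
      · -- p is the head, q later
        have h1 : t1.contains (i, w).2 = true := hc1p
        have hiq := hlt q hqr
        have hpq' : |i - q.1| ≤ d := hpq
        rw [abs_le] at hpq'
        apply kwScan_of_state1 d t1 t2 rest _ _ i _ hs' ⟨q, hqr, hc2q, by omega⟩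
        exact ⟨i, by rw [if_pos h1], le_refl i, hlt⟩
      · -- q is the head, p later
        subst h'
        have h2 : t2.contains (i, w).2 = true := hc2q
        have hip := hlt p hpr
        have hpq' : |p.1 - i| ≤ d := hpq
        rw [abs_le] at hpq'
        apply kwScan_of_state2 d t1 t2 rest _ _ i _ hs' ⟨p, hpr, hc1p, by omega⟩
        exact ⟨i, by rw [if_pos h2], le_refl i, hlt⟩
      · exact ih _ _ hs' ⟨p, hpr, q, hqr, hc1p, hc2q, hpq⟩

-- soundness: if the scan succeeds, a close pair exists, or a match reaches a stored position,
-- or the stored pair was already close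
lemma kwScan_sound (d : Int) (t1 t2 : PySem.Set String) (l : List (Int × String))
    (l1 l2 : Option Int)
    (hs : l.Pairwise (fun p q => p.1 < q.1)) :
    kwScan d t1 t2 l l1 l2 = true →
      (∃ p ∈ l, ∃ q ∈ l, t1.contains p.2 = true ∧ t2.contains q.2 = true ∧ |p.1 - q.1| ≤ d)
      ∨ (∃ a, l1 = some a ∧ ∃ q ∈ l, t2.contains q.2 = true ∧ |a - q.1| ≤ d)
      ∨ (∃ b, l2 = some b ∧ ∃ p ∈ l, t1.contains p.2 = true ∧ |p.1 - b| ≤ d)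
      ∨ (∃ a b, l1 = some a ∧ l2 = some b ∧ |a - b| ≤ d) := by
  induction l generalizing l1 l2 with
  | nil => simp [kwScan]
  | cons hd rest ih =>
    obtain ⟨i, w⟩ := hd
    have hlt : ∀ x ∈ rest, i < x.1 := fun x hx => (List.pairwise_cons.mp hs).1 x hx
    have hs' := (List.pairwise_cons.mp hs).2
    intro h
    simp only [kwScan] at h
    by_cases h1 : t1.contains w = true <;> by_cases h2 : t2.contains w = true <;>
      first
      | rw [if_pos h1, if_pos h2] at h
      | rw [if_pos h1, if_neg h2] at h
      | rw [if_neg h1, if_pos h2] at h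
      | rw [if_neg h1, if_neg h2] at h
    · -- head matches both phrases
      split_ifs at h with hchk
      · simp only [kwClose, decide_eq_true_eq] at hchk
        exact Or.inl ⟨(i, w), List.mem_cons_self .., (i, w), List.mem_cons_self .., h1, h2, hchk⟩
      · rcases ih (some i) (some i) hs' h with hc | ⟨a, ha, q, hq, hcq, hd'⟩ | ⟨b, hb, p, hp, hcp, hd'⟩ | ⟨a, b, ha, hb, hd'⟩
        · rcases hc with ⟨p, hp, q, hq, c1, c2, c3⟩
          exact Or.inl ⟨p, List.mem_cons_of_mem _ hp, q, List.mem_cons_of_mem _ hq, c1, c2, c3⟩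
        · injection ha with ha; subst ha
          exact Or.inl ⟨(i, w), List.mem_cons_self .., q, List.mem_cons_of_mem _ hq, h1, hcq, hd'⟩
        · injection hb with hb; subst hb
          exact Or.inl ⟨p, List.mem_cons_of_mem _ hp, (i, w), List.mem_cons_self .., hcp, h2, hd'⟩
        · injection ha with ha; injection hb with hb; subst ha; subst hb
          exact Or.inl ⟨(i, w), List.mem_cons_self .., (i, w), List.mem_cons_self .., h1, h2, hd'⟩
    · -- head matches phrase 1 only
      split_ifs at h with hchk
      · rcases (kwClose_iff d _ _).1 hchk with ⟨a, b, ha, hb, hd'⟩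
        injection ha with ha; subst ha
        exact Or.inr (Or.inr (Or.inl ⟨b, hb, (i, w), List.mem_cons_self .., h1, hd'⟩))
      · rcases ih (some i) l2 hs' h with hc | ⟨a, ha, q, hq, hcq, hd'⟩ | ⟨b, hb, p, hp, hcp, hd'⟩ | ⟨a, b, ha, hb, hd'⟩
        · rcases hc with ⟨p, hp, q, hq, c1, c2, c3⟩
          exact Or.inl ⟨p, List.mem_cons_of_mem _ hp, q, List.mem_cons_of_mem _ hq, c1, c2, c3⟩
        · injection ha with ha; subst ha
          exact Or.inl ⟨(i, w), List.mem_cons_self .., q, List.mem_cons_of_mem _ hq, h1, hcq, hd'⟩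
        · exact Or.inr (Or.inr (Or.inl ⟨b, hb, p, List.mem_cons_of_mem _ hp, hcp, hd'⟩))
        · injection ha with ha; subst ha
          exact Or.inr (Or.inr (Or.inl ⟨b, hb, (i, w), List.mem_cons_self .., h1, hd'⟩))
    · -- head matches phrase 2 only
      split_ifs at h with hchk
      · rcases (kwClose_iff d _ _).1 hchk with ⟨a, b, ha, hb, hd'⟩
        injection hb with hb; subst hb
        exact Or.inr (Or.inl ⟨a, ha, (i, w), List.mem_cons_self .., h2, hd'⟩)
      · rcases ih l1 (some i) hs' h with hc | ⟨a, ha, q, hq, hcq, hd'⟩ | ⟨b, hb, p, hp, hcp, hd'⟩ | ⟨a, b, ha, hb, hd'⟩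
        · rcases hc with ⟨p, hp, q, hq, c1, c2, c3⟩
          exact Or.inl ⟨p, List.mem_cons_of_mem _ hp, q, List.mem_cons_of_mem _ hq, c1, c2, c3⟩
        · exact Or.inr (Or.inl ⟨a, ha, q, List.mem_cons_of_mem _ hq, hcq, hd'⟩)
        · injection hb with hb; subst hb
          exact Or.inl ⟨p, List.mem_cons_of_mem _ hp, (i, w), List.mem_cons_self .., hcp, h2, hd'⟩
        · injection hb with hb; subst hb
          exact Or.inr (Or.inl ⟨a, ha, (i, w), List.mem_cons_self .., h2, hd'⟩)
    · -- head matches neither phrase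
      split_ifs at h with hchk
      · rcases (kwClose_iff d _ _).1 hchk with ⟨a, b, ha, hb, hd'⟩
        exact Or.inr (Or.inr (Or.inr ⟨a, b, ha, hb, hd'⟩))
      · rcases ih l1 l2 hs' h with hc | ⟨a, ha, q, hq, hcq, hd'⟩ | ⟨b, hb, p, hp, hcp, hd'⟩ | hc4
        · rcases hc with ⟨p, hp, q, hq, c1, c2, c3⟩
          exact Or.inl ⟨p, List.mem_cons_of_mem _ hp, q, List.mem_cons_of_mem _ hq, c1, c2, c3⟩
        · exact Or.inr (Or.inl ⟨a, ha, q, List.mem_cons_of_mem _ hq, hcq, hd'⟩)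
        · exact Or.inr (Or.inr (Or.inl ⟨b, hb, p, List.mem_cons_of_mem _ hp, hcp, hd'⟩))
        · exact Or.inr (Or.inr (Or.inr hc4))

lemma contains_ofList_eq (xs : List String) (w : String) :
    (PySem.Set.ofList xs).contains w = xs.contains w := by
  by_cases h : w ∈ xs <;>
    simp [PySem.Set.mem_ofList, h]

lemma kwScan_iff_top (d : Int) (t1 t2 : PySem.Set String) (l : List (Int × String))
    (hs : l.Pairwise (fun p q => p.1 < q.1)) :
    kwScan d t1 t2 l none none = true ↔
      ∃ p ∈ l, ∃ q ∈ l, t1.contains p.2 = true ∧ t2.contains q.2 = true ∧ |p.1 - q.1| ≤ d := by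
  constructor
  · intro h
    rcases kwScan_sound d t1 t2 l none none hs h with h | ⟨a, ha, _⟩ | ⟨b, hb, _⟩ | ⟨a, b, ha, _⟩
    · exact h
    · simp at ha
    · simp at hb
    · simp at ha
  · exact kwScan_of_pair d t1 t2 l none none hs

-- ===== VERDICT (by name: the statement is the Claim_ definition above) =====
theorem keywords_nearby_spec : Claim_equal_keywords_nearby := by
  intro text phrase1 phrase2 d _
  unfold Spec_keywords_nearby
  simp only [keywords_nearby, keywords_nearby_alt]
  have hbool : ∀ x y : Bool, (x = true ↔ y = true) → x = y := by decide
  apply hbool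
  rw [kwOuter_iff,
    kwScan_iff_top d (PySem.Set.ofList (pvTokens phrase1)) (PySem.Set.ofList (pvTokens phrase2)) _
      (PySem.List.pairwise_lt_enumerate _ _)]
  simp only [List.mem_map, List.mem_filter, contains_ofList_eq]
  constructor
  · rintro ⟨i, ⟨p, ⟨hp, hc1⟩, rfl⟩, j, ⟨q, ⟨hq, hc2⟩, rfl⟩, hd⟩
    exact ⟨p, hp, q, hq, hc1, hc2, hd⟩
  · rintro ⟨p, hp, q, hq, hc1, hc2, hd⟩
    exact ⟨p.1, ⟨p, ⟨hp, hc1⟩, rfl⟩, q.1, ⟨q, ⟨hq, hc2⟩, rfl⟩, hd⟩
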